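-- pv_equiv track=rewrite | github.com/Satendra8/Strivers-A2Z-DSA | 11. Heaps/11.2 Medium Problems/11.2.6 Hand of Straights.py | straightHand
-- ===== SOURCE A (Python) =====
-- def findSuccessors(hand, j, n, groupSize):
--     nextElement = hand[j] + 1
--     hand[j] = -1
--     j += 1
--     counter = 1
--
--     while j < n and counter < groupSize:
--         if hand[j] == nextElement:
--             nextElement = hand[j] + 1
--             hand[j] = -1
--             counter += 1
--         j += 1
--     if counter != groupSize:
--         return False
--     return True
--
-- def straightHand(hand, groupSize):
--     """
--     1. Sort the array
--     2. pick 1 element find its all successor and mark -1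
--     3. if successor not exist return False
--     Time Complexity: O(N^2)
--     Space Complexity: O(1)
--     """
--     n = len(hand)
--     if n % groupSize == 1:
--         return False
--     hand.sort()
--
--     for i in range(n):
--         if hand[i] == -1:
--             continue
--         ans = findSuccessors(hand, i, n, groupSize)
--         if not ans:
--             return False
--     return True
-- ===== SOURCE B (Python) =====
-- def straightHand(hand, groupSize):
--     count = {}
--     for x in hand:
--         count[x] = count.get(x, 0) + 1
--     for v in sorted(hand):
--         if count[v] > 0:
--             for w in range(v, v + groupSize):
--                 count[w] = count.get(w, 0) - 1
--                 if count[w] < 0: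
--                     return False
--     return all(c == 0 for c in count.values())
-- ===== Notes on version B (the rewrite author's own statement) =====
-- stated objective: alternative
-- what changed: B replaces A's in-place -1-marking greedy, which rescans the sorted array from each group start, by a hash-map counter greedy: sort once, and for each card with a remaining count start a group and decrement the counts of the groupSize consecutive values directly, failing on a negative count.
-- outside the precondition, e.g. on straightHand([-1, 0], 2): A returns False, B returns True; on straightHand([-1, -1], 2): A returns True, B returns False; on straightHand([3], 0): A raises ZeroDivisionError, B returns False
import Mathlib
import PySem

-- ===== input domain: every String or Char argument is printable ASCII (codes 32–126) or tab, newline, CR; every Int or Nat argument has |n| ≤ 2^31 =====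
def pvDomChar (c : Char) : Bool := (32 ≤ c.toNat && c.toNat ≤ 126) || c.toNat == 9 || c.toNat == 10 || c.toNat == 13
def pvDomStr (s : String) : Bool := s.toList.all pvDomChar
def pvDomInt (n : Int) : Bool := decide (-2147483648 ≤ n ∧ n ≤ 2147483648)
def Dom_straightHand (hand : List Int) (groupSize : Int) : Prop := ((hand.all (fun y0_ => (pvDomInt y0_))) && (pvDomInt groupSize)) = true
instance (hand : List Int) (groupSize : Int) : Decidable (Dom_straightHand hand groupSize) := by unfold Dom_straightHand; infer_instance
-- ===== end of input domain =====

-- B replaces A's in-place -1-marking greedy (rescans the sorted list per group) by a counter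
-- greedy over the sorted cards (objective: alternative).  NOTE: the Python A sorts `hand` in place
-- and overwrites its entries with -1; the equivalence proved here is about the RETURN value only.

-- ===== PORT A =====
-- the `while j < n and counter < groupSize` loop of findSuccessors (hand[j] accesses are in range
-- on every reachable call, so the `.getD 0` default of the exact pyGet? is never used)
def fsWhile (hand : List Int) (j n groupSize nextElement counter : Int) : List Int × Int :=
  if _h : j < n ∧ counter < groupSize then
    if (PySem.List.pyGet? hand j).getD 0 = nextElement then
      fsWhile (PySem.List.pySetD hand j (-1)) (j + 1) n groupSize (nextElement + 1) (counter + 1)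
    else
      fsWhile hand (j + 1) n groupSize nextElement counter
  else (hand, counter)
termination_by (n - j).toNat
decreasing_by all_goals omega

def findSuccessors (hand : List Int) (j n groupSize : Int) : Bool × List Int :=
  let nextElement := (PySem.List.pyGet? hand j).getD 0 + 1
  let hand1 := PySem.List.pySetD hand j (-1)
  let r := fsWhile hand1 (j + 1) n groupSize nextElement 1
  if r.2 ≠ groupSize then (false, r.1) else (true, r.1)

-- the `for i in range(n)` loop of straightHand
def shLoop (hand : List Int) (i n groupSize : Int) : Bool :=
  if _h : i < n then
    if (PySem.List.pyGet? hand i).getD 0 = -1 then shLoop hand (i + 1) n groupSize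
    else
      let r := findSuccessors hand i n groupSize
      if r.1 = false then false else shLoop r.2 (i + 1) n groupSize
  else true
termination_by (n - i).toNat
decreasing_by all_goals omega

def straightHand (hand : List Int) (groupSize : Int) : Bool :=
  let n : Int := hand.length
  if PySem.Int.mod n groupSize = 1 then false
  else shLoop (PySem.List.sorted hand (fun x => x) false) 0 n groupSize

-- ===== PORT B =====
-- the `for w in range(v, v + groupSize)` loop (none = `return False`)
def bChain (ws : List Int) (count : PySem.Dict Int Int) : Option (PySem.Dict Int Int) :=
  match ws with
  | [] => some count
  | w :: ws =>
    let count := count.insert w (count.getD w 0 - 1)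
    if count.getD w 0 < 0 then none else bChain ws count

-- the `for v in sorted(hand)` loop
def bOuter (cards : List Int) (count : PySem.Dict Int Int) (groupSize : Int) :
    Option (PySem.Dict Int Int) :=
  match cards with
  | [] => some count
  | v :: rest =>
    if count.getD v 0 > 0 then
      match bChain (PySem.List.pyRange v (v + groupSize) 1) count with
      | none => none
      | some count => bOuter rest count groupSize
    else bOuter rest count groupSize

def straightHand_alt (hand : List Int) (groupSize : Int) : Bool :=
  let count := hand.foldl (fun d x => d.insert x (d.getD x 0 + 1)) PySem.Dict.empty
  match bOuter (PySem.List.sorted hand (fun x => x) false) count groupSize with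
  | none => false
  | some count => count.values.all (fun c => c == 0)

-- ===== PRECONDITION & SPEC =====
-- Pre_ excludes groupSize = 0, where A raises ZeroDivisionError on `n % groupSize`, and hands
-- containing the value -1, which A uses as an in-band 'consumed' sentinel (card values are
-- positive in this task's natural domain): there A's answer is an artifact of the sentinel
-- colliding with real cards.
def Pre_straightHand (hand : List Int) (groupSize : Int) : Prop :=
  groupSize ≠ 0 ∧ (-1 : Int) ∉ hand
instance (hand : List Int) (groupSize : Int) : Decidable (Pre_straightHand hand groupSize) := by
  unfold Pre_straightHand; infer_instance

def pvWitness_straightHand : List Int × Int := ([1, 2, 3, 2, 3, 4], 3)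

def Spec_straightHand (hand : List Int) (groupSize : Int) (out : Bool) : Prop :=
  out = straightHand_alt hand groupSize
instance (hand : List Int) (groupSize : Int) (out : Bool) : Decidable (Spec_straightHand hand groupSize out) := by
  unfold Spec_straightHand; infer_instance

-- ===== CLAIM (what is proved, stated in full; the proofs are below) =====
def Claim_equal_straightHand : Prop := ∀ (hand : List Int) (groupSize : Int), Dom_straightHand hand groupSize → Pre_straightHand hand groupSize → Spec_straightHand hand groupSize (straightHand hand groupSize)

-- ===== LEMMAS AND PROOFS =====
-- ghost model: the sorted list with a consumed-mask per cell; render is what A's array holds,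
-- resid the multiset of not-yet-consumed cards
def render (z : List (Int × Bool)) : List Int := z.map (fun p => if p.2 then -1 else p.1)
def resid (z : List (Int × Bool)) : List Int := (z.filter (fun p => !p.2)).map Prod.fst

def scanZ : List (Int × Bool) → Int → Nat → List (Int × Bool) × Nat
  | z, _, 0 => (z, 0)
  | [], _, k => ([], k)
  | (v, m) :: z, t, k+1 =>
    if (if m then -1 else v) = t then
      let r := scanZ z (t+1) k
      ((v, true) :: r.1, r.2)
    else
      let r := scanZ z t (k+1)
      ((v, m) :: r.1, r.2)

def rmv : List Int → Int → Option (List Int)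
  | [], _ => none
  | x :: xs, t => if x = t then some xs else (rmv xs t).map (fun ys => x :: ys)

def run : List Int → Int → Nat → Option (List Int)
  | r, _, 0 => some r
  | r, t, k+1 => match rmv r t with
    | none => none
    | some r' => run r' (t+1) k

theorem length_scanZ (z : List (Int × Bool)) (t : Int) (k : Nat) :
    (scanZ z t k).1.length = z.length := by
  induction z generalizing t k with
  | nil => cases k <;> simp [scanZ]
  | cons p z ih =>
    obtain ⟨v, m⟩ := p
    cases k with
    | zero => simp [scanZ]
    | succ k =>
      cases m
      · by_cases hc : v = t <;> simp [scanZ, hc, ih]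
      · by_cases hc : (-1 : Int) = t <;> simp [scanZ, hc, ih]

theorem fst_scanZ (z : List (Int × Bool)) (t : Int) (k : Nat) :
    (scanZ z t k).1.map Prod.fst = z.map Prod.fst := by
  induction z generalizing t k with
  | nil => cases k <;> simp [scanZ]
  | cons p z ih =>
    obtain ⟨v, m⟩ := p
    cases k with
    | zero => simp [scanZ]
    | succ k =>
      cases m
      · by_cases hc : v = t <;> simp [scanZ, hc, ih]
      · by_cases hc : (-1 : Int) = t <;> simp [scanZ, hc, ih]

def outerZ (gs : Int) : List (Int × Bool) → Bool
  | [] => true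
  | (_, true) :: z => outerZ gs z
  | (v, false) :: z =>
    let r := scanZ z (v+1) (gs-1).toNat
    if r.2 = 0 then outerZ gs r.1 else false
termination_by z => z.length
decreasing_by all_goals simp [length_scanZ]

-- invariants of the reachable A-states
def P1 (z : List (Int × Bool)) : Prop := List.Pairwise (· ≤ ·) (z.map Prod.fst)
def P2 (z : List (Int × Bool)) : Prop := (-1 : Int) ∉ z.map Prod.fst
def P3 (z : List (Int × Bool)) : Prop :=
  z.Pairwise (fun p q => p.1 = q.1 → q.2 = true → p.2 = true)
def P4 (z : List (Int × Bool)) : Prop :=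
  (∃ p ∈ z, p.2 = false ∧ p.1 ≤ -2) → ∀ p ∈ z, p.2 = true → p.1 ≤ -2

theorem mem_resid {x : Int} {z : List (Int × Bool)} : x ∈ resid z ↔ (x, false) ∈ z := by
  simp only [resid, List.mem_map, List.mem_filter]
  constructor
  · rintro ⟨⟨a, b⟩, ⟨hm, hb⟩, rfl⟩; simp at hb; simpa [hb] using hm
  · intro h; exact ⟨(x, false), ⟨h, rfl⟩, rfl⟩

theorem rmv_eq_none_iff (r : List Int) (t : Int) : rmv r t = none ↔ t ∉ r := by
  induction r with
  | nil => simp [rmv]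
  | cons x xs ih =>
    by_cases hx : x = t
    · subst hx; simp [rmv]
    · simp only [rmv, if_neg hx]
      cases h : rmv xs t <;> simp_all [eq_comm]

theorem rmv_sublist {r r' : List Int} {t : Int} (h : rmv r t = some r') : r'.Sublist r := by
  induction r generalizing r' with
  | nil => simp [rmv] at h
  | cons x xs ih =>
    by_cases hx : x = t
    · simp [rmv, hx] at h; subst h; exact (List.sublist_cons_self x xs)
    · simp only [rmv, if_neg hx, Option.map_eq_some_iff] at h
      obtain ⟨ys, hy, rfl⟩ := h
      exact List.Sublist.cons₂ x (ih hy)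

theorem rmv_count_self {r r' : List Int} {t : Int} (h : rmv r t = some r') :
    r'.count t + 1 = r.count t := by
  induction r generalizing r' with
  | nil => simp [rmv] at h
  | cons y xs ih =>
    by_cases hy : y = t
    · rw [rmv, if_pos hy] at h
      obtain rfl := Option.some_injective _ h
      simp [List.count_cons, hy]
    · rw [rmv, if_neg hy, Option.map_eq_some_iff] at h
      obtain ⟨ys, hys, rfl⟩ := h
      have := ih hys
      simp only [List.count_cons, if_neg hy]
      omega

theorem rmv_count_ne {r r' : List Int} {t x : Int} (h : rmv r t = some r') (hx : x ≠ t) :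
    r'.count x = r.count x := by
  induction r generalizing r' with
  | nil => simp [rmv] at h
  | cons y xs ih =>
    by_cases hy : y = t
    · rw [rmv, if_pos hy] at h
      obtain rfl := Option.some_injective _ h
      have : ¬ y = x := fun hc => hx (hc ▸ hy)
      simp [List.count_cons, this]
    · rw [rmv, if_neg hy, Option.map_eq_some_iff] at h
      obtain ⟨ys, hys, rfl⟩ := h
      simp only [List.count_cons, ih hys]

theorem rmv_length {r r' : List Int} {t : Int} (h : rmv r t = some r') :
    r'.length + 1 = r.length := by
  induction r generalizing r' with
  | nil => simp [rmv] at h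
  | cons y xs ih =>
    by_cases hy : y = t
    · simp [rmv, hy] at h; subst h; rfl
    · simp only [rmv, if_neg hy, Option.map_eq_some_iff] at h
      obtain ⟨ys, hys, rfl⟩ := h
      simpa using ih hys

theorem run_sublist {r r' : List Int} {t : Int} {k : Nat} (h : run r t k = some r') :
    r'.Sublist r := by
  induction k generalizing r t with
  | zero => simp [run] at h; subst h; exact List.Sublist.refl r
  | succ k ih =>
    simp only [run] at h
    cases hr : rmv r t with
    | none => simp [hr] at h
    | some q => rw [hr] at h; exact (ih h).trans (rmv_sublist hr)

theorem run_length {r r' : List Int} {t : Int} {k : Nat} (h : run r t k = some r') :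
    r'.length + k = r.length := by
  induction k generalizing r t with
  | zero => simp [run] at h; subst h; rfl
  | succ k ih =>
    simp only [run] at h
    cases hr : rmv r t with
    | none => simp [hr] at h
    | some q => rw [hr] at h; have := ih h; have := rmv_length hr; omega

theorem run_cons_lt {v t : Int} (hv : v < t) (r : List Int) (k : Nat) :
    run (v :: r) t k = (run r t k).map (fun r' => v :: r') := by
  induction k generalizing r t with
  | zero => simp [run]
  | succ k ih =>
    have hne : v ≠ t := ne_of_lt hv
    simp only [run, rmv, if_neg hne]
    cases hr : rmv r t with
    | none => simp
    | some q => simpa using ih (t := t+1) (r := q) (by omega)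

theorem run_replicate {v t : Int} (hv : v < t) (j : Nat) (r : List Int) (k : Nat) :
    run (List.replicate j v ++ r) t k = (run r t k).map (fun r' => List.replicate j v ++ r') := by
  induction j with
  | zero => simp
  | succ j ih =>
    rw [List.replicate_succ, List.cons_append, run_cons_lt hv, ih]
    cases run r t k <;> simp

theorem run_none_neg1 {r : List Int} {t : Int} {k : Nat} (h1 : t ≤ -1) (h2 : -1 < t + k)
    (h3 : (-1 : Int) ∉ r) : run r t k = none := by
  induction k generalizing r t with
  | zero => omega
  | succ k ih =>
    simp only [run]
    by_cases ht : t = -1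
    · subst ht; rw [(rmv_eq_none_iff r (-1)).2 h3]
    · cases hr : rmv r t with
      | none => rfl
      | some q =>
        have hq : (-1 : Int) ∉ q := fun hmem => h3 ((rmv_sublist hr).mem hmem)
        have : ((k : Int)) + (t + 1) = t + (k+1 : Nat) := by push_cast; ring
        exact ih (by omega) (by push_cast; push_cast at h2; omega) hq

theorem scanZ_no_match {z : List (Int × Bool)} {t : Int}
    (h : ∀ p ∈ z, (if p.2 then -1 else p.1) ≠ t) (k : Nat) : scanZ z t k = (z, k) := by
  induction z with
  | nil => cases k <;> simp [scanZ]
  | cons p z ih =>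
    obtain ⟨v, m⟩ := p
    cases k with
    | zero => simp [scanZ]
    | succ k =>
      have hh := h (v, m) (by simp)
      have ht : ∀ q ∈ z, (if q.2 then -1 else q.1) ≠ t := fun q hq => h q (by simp [hq])
      cases m
      · have hh' : ¬ v = t := by simpa using hh
        simp [scanZ, hh', ih ht]
      · have hh' : ¬ (-1 : Int) = t := by simpa using hh
        simp [scanZ, hh', ih ht]

theorem scanZ_append_lt {P z2 : List (Int × Bool)} {t : Int}
    (h : ∀ p ∈ P, (if p.2 then -1 else p.1) < t) (k : Nat) :
    scanZ (P ++ z2) t k = (P ++ (scanZ z2 t k).1, (scanZ z2 t k).2) := by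
  induction P with
  | nil => simp
  | cons p P ih =>
    obtain ⟨v, m⟩ := p
    cases k with
    | zero => simp [scanZ]
    | succ k =>
      have hh : (if m then (-1:Int) else v) ≠ t := ne_of_lt (h (v, m) (by simp))
      have ht : ∀ q ∈ P, (if q.2 then -1 else q.1) < t := fun q hq => h q (by simp [hq])
      cases m
      · have hh' : ¬ v = t := by simpa using hh
        simp [scanZ, hh', ih ht]
      · have hh' : ¬ (-1 : Int) = t := by simpa using hh
        simp [scanZ, hh', ih ht]


theorem P1_tail {p : Int × Bool} {z : List (Int × Bool)} (h : P1 (p :: z)) : P1 z := by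
  unfold P1 at h ⊢; simp only [List.map_cons] at h; exact h.of_cons

theorem P1_head_le {p : Int × Bool} {z : List (Int × Bool)} (h : P1 (p :: z)) :
    ∀ q ∈ z, p.1 ≤ q.1 := by
  unfold P1 at h; simp only [List.map_cons] at h
  intro q hq
  exact List.rel_of_pairwise_cons h (List.mem_map.2 ⟨q, hq, rfl⟩)

theorem P2_tail {p : Int × Bool} {z : List (Int × Bool)} (h : P2 (p :: z)) : P2 z := by
  unfold P2 at h ⊢; simp only [List.map_cons, List.mem_cons] at h; exact fun hc => h (Or.inr hc)

theorem P2_head {p : Int × Bool} {z : List (Int × Bool)} (h : P2 (p :: z)) : p.1 ≠ -1 := by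
  unfold P2 at h; simp only [List.map_cons, List.mem_cons] at h
  exact fun hc => h (Or.inl hc.symm)

theorem P3_tail {p : Int × Bool} {z : List (Int × Bool)} (h : P3 (p :: z)) : P3 z :=
  h.of_cons

theorem P3_head {p : Int × Bool} {z : List (Int × Bool)} (h : P3 (p :: z)) {q : Int × Bool}
    (hq : q ∈ z) : p.1 = q.1 → q.2 = true → p.2 = true :=
  List.rel_of_pairwise_cons h hq

-- THE core lemma: A's forward scan over the masked array computes exactly the sequential
-- first-occurrence removals `run` on the unconsumed multiset, and preserves the invariants.
theorem scan_run : ∀ (z : List (Int × Bool)) (t : Int) (k : Nat),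
    P1 z → P2 z → P3 z →
    (∀ p ∈ z, p.2 = true → t ≤ p.1) →
    (t ≤ -1 → -1 < t + k → ∀ p ∈ z, p.2 = true → p.1 ≤ -2) →
    ((run (resid z) t k = none → (scanZ z t k).2 ≠ 0)
     ∧ (∀ r', run (resid z) t k = some r' → (scanZ z t k).2 = 0 ∧ resid (scanZ z t k).1 = r')
     ∧ P3 (scanZ z t k).1
     ∧ (∀ p ∈ (scanZ z t k).1, p.2 = true → (p.1, true) ∈ z ∨ (t ≤ p.1 ∧ p.1 < t + k))) := by
  intro z
  induction z with
  | nil =>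
    intro t k _ _ _ _ _
    cases k with
    | zero =>
      refine ⟨by simp [run], fun r' hr => ?_, by simp [scanZ, P3], by simp [scanZ]⟩
      simp [run, resid] at hr
      subst hr
      simp [scanZ, resid]
    | succ k =>
      exact ⟨fun _ => by simp [scanZ], fun r' hr => by simp [run, resid, rmv] at hr,
        by simp [scanZ, P3], by simp [scanZ]⟩
  | cons p z ih =>
    intro t k h1 h2 h3 hm hb
    obtain ⟨v, m⟩ := p
    have h1' : P1 z := P1_tail h1
    have h2' : P2 z := P2_tail h2
    have h3' : P3 z := P3_tail h3
    have hvne : v ≠ -1 := P2_head h2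
    cases k with
    | zero =>
      refine ⟨by simp [run], ?_, by simpa [scanZ] using h3, ?_⟩
      · intro r' hr; simp [run] at hr; simp [scanZ, hr]
      · intro q hq hqt
        simp only [scanZ] at hq
        have hqe : q = (q.1, true) := by rw [← hqt]
        exact Or.inl (hqe ▸ hq)
    | succ k =>
      have hmz : ∀ p ∈ z, p.2 = true → t ≤ p.1 := fun q hq => hm q (by simp [hq])
      have hbz : t ≤ -1 → -1 < t + (k+1:Nat) → ∀ p ∈ z, p.2 = true → p.1 ≤ -2 :=
        fun a b q hq => hb a b q (by simp [hq])
      cases m with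
      | true =>
        -- masked head: never matches (a mask with the sought value -1 is impossible)
        have hne : (-1 : Int) ≠ t := by
          intro hc
          have hv1 : t ≤ v := hm (v, true) (by simp) rfl
          have hv2 : v ≤ -2 := hb (by omega) (by push_cast; omega) (v, true) (by simp) rfl
          omega
        have heq : scanZ ((v, true) :: z) t (k+1)
            = ((v, true) :: (scanZ z t (k+1)).1, (scanZ z t (k+1)).2) := by
          simp [scanZ, hne]
        obtain ⟨c1, c2, c3, c4⟩ := ih t (k+1) h1' h2' h3' hmz hbz
        have hres : resid ((v, true) :: z) = resid z := by simp [resid]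
        refine ⟨?_, ?_, ?_, ?_⟩
        · rw [heq, hres]; exact c1
        · intro r' hr; rw [hres] at hr; rw [heq]
          exact ⟨(c2 r' hr).1, by simpa [resid] using (c2 r' hr).2⟩
        · rw [heq]
          exact List.Pairwise.cons (fun q _ _ _ => rfl) c3
        · rw [heq]
          intro q hq hqt
          rcases List.mem_cons.1 hq with rfl | hq'
          · exact Or.inl (by simp)
          · rcases c4 q hq' hqt with hin | hrange
            · exact Or.inl (by simp [hin])
            · exact Or.inr hrange
      | false =>
        rcases lt_trichotomy v t with hvt | hvt | hvt
        · -- v < t : head is skipped, and stays in front of the residual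
          have hne : v ≠ t := ne_of_lt hvt
          have heq : scanZ ((v, false) :: z) t (k+1)
              = ((v, false) :: (scanZ z t (k+1)).1, (scanZ z t (k+1)).2) := by
            simp [scanZ, hne]
          obtain ⟨c1, c2, c3, c4⟩ := ih t (k+1) h1' h2' h3' hmz hbz
          have hres : resid ((v, false) :: z) = v :: resid z := by simp [resid]
          have hrun : run (resid ((v, false) :: z)) t (k+1)
              = (run (resid z) t (k+1)).map (fun r' => v :: r') := by
            rw [hres]; exact run_cons_lt hvt _ _
          refine ⟨?_, ?_, ?_, ?_⟩
          · intro hr; rw [hrun] at hr; simp at hr; rw [heq]; exact c1 hr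
          · intro r' hr; rw [hrun] at hr
            rw [Option.map_eq_some_iff] at hr
            obtain ⟨q, hq, rfl⟩ := hr
            rw [heq]
            exact ⟨(c2 q hq).1, by simpa [resid] using (c2 q hq).2⟩
          · rw [heq]
            refine List.Pairwise.cons ?_ c3
            intro q hq hfst hqt
            rcases c4 q hq hqt with hin | hrange
            · exact P3_head h3 hin hfst rfl
            · exfalso; omega
          · rw [heq]
            intro q hq hqt
            rcases List.mem_cons.1 hq with rfl | hq'
            · simp at hqt
            · rcases c4 q hq' hqt with hin | hrange
              · exact Or.inl (by simp [hin])
              · exact Or.inr hrange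
        · -- v = t : the match; consume and continue with t+1
          subst hvt
          have heq : scanZ ((v, false) :: z) v (k+1)
              = ((v, true) :: (scanZ z (v+1) k).1, (scanZ z (v+1) k).2) := by
            simp [scanZ]
          have hmz' : ∀ p ∈ z, p.2 = true → v + 1 ≤ p.1 := by
            intro q hq hqt
            have h1q : v ≤ q.1 := P1_head_le h1 q hq
            have hne : ¬ ((v, false) : Int × Bool).1 = q.1 := by
              intro hc
              exact absurd (P3_head h3 hq hc hqt) (by simp)
            simp only at hne
            omega
          have hbz' : v + 1 ≤ -1 → -1 < (v+1) + k → ∀ p ∈ z, p.2 = true → p.1 ≤ -2 := by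
            intro a b q hq hqt
            exact hb (by omega) (by push_cast at b ⊢; omega) q (by simp [hq]) hqt
          obtain ⟨c1, c2, c3, c4⟩ := ih (v+1) k h1' h2' h3' hmz' hbz'
          have hres : resid ((v, false) :: z) = v :: resid z := by simp [resid]
          have hrun : run (resid ((v, false) :: z)) v (k+1) = run (resid z) (v+1) k := by
            rw [hres]; simp [run, rmv]
          refine ⟨?_, ?_, ?_, ?_⟩
          · intro hr; rw [hrun] at hr; rw [heq]; exact c1 hr
          · intro r' hr; rw [hrun] at hr; rw [heq]
            exact ⟨(c2 r' hr).1, by simpa [resid] using (c2 r' hr).2⟩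
          · rw [heq]
            exact List.Pairwise.cons (fun q _ _ _ => rfl) c3
          · rw [heq]
            intro q hq hqt
            rcases List.mem_cons.1 hq with rfl | hq'
            · refine Or.inr ⟨le_refl _, by push_cast; omega⟩
            · rcases c4 q hq' hqt with hin | hrange
              · exact Or.inl (by simp [hin])
              · obtain ⟨hr1, hr2⟩ := hrange
                refine Or.inr ⟨by omega, ?_⟩
                push_cast at hr2 ⊢
                omega
        · -- t < v : sorted, so t never occurs ahead; no match at all
          have hnm : ∀ p ∈ (v, false) :: z, (if p.2 then -1 else p.1) ≠ t := by
            intro q hq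
            rcases List.mem_cons.1 hq with rfl | hq'
            · simpa using ne_of_gt hvt
            · by_cases hq2 : q.2 = true
              · simp only [hq2, if_true]
                intro hc
                have hv1 : t ≤ q.1 := hm q (by simp [hq']) hq2
                have hv2 : q.1 ≤ -2 := hb (by omega) (by push_cast; omega) q (by simp [hq']) hq2
                omega
              · have hq2' : q.2 = false := by revert hq2; cases q.2 <;> simp
                simp [hq2']
                have h1q : v ≤ q.1 := P1_head_le h1 q hq'
                omega
          have heq := scanZ_no_match hnm (k+1)
          have htr : t ∉ resid ((v, false) :: z) := by
            intro hmem
            obtain hz := mem_resid.1 hmem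
            rcases List.mem_cons.1 hz with hc | hq'
            · have := congrArg Prod.fst hc
              simp at this
              omega
            · have h1q : v ≤ t := by simpa using P1_head_le h1 (t, false) hq'
              omega
          have hrun : run (resid ((v, false) :: z)) t (k+1) = none := by
            simp only [run]
            rw [(rmv_eq_none_iff _ _).2 htr]
          refine ⟨?_, ?_, ?_, ?_⟩
          · intro _; rw [heq]; simp
          · intro r' hr; rw [hrun] at hr; simp at hr
          · rw [heq]; exact h3
          · rw [heq]
            intro q hq hqt
            have hqe : q = (q.1, true) := by rw [← hqt]
            exact Or.inl (hqe ▸ hq)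

-- B's inner window loop against `run`
theorem bChain_run : ∀ (k : Nat) (t : Int) (count : PySem.Dict Int Int) (r : List Int),
    count.keys.Nodup → (∀ x : Int, count.getD x 0 = r.count x) →
    ((run r t k = none → bChain (PySem.List.pyRange t (t + k) 1) count = none)
     ∧ (∀ r', run r t k = some r' →
        ∃ d, bChain (PySem.List.pyRange t (t + k) 1) count = some d ∧
          d.keys.Nodup ∧ (∀ x : Int, d.getD x 0 = r'.count x))) := by
  intro k
  induction k with
  | zero =>
    intro t count r hnd hrel
    constructor
    · intro h; simp [run] at h
    · intro r' hr
      simp only [run] at hr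
      obtain rfl := Option.some_injective _ hr
      rw [show ((t : Int) + ((0:Nat) : Int)) = t by push_cast; ring]
      rw [PySem.List.pyRange_one_eq_nil (le_refl t)]
      exact ⟨count, rfl, hnd, hrel⟩
  | succ k ih =>
    intro t count r hnd hrel
    have hrange : PySem.List.pyRange t (t + ((k+1:Nat) : Int)) 1
        = t :: PySem.List.pyRange (t+1) (t + ((k+1:Nat) : Int)) 1 :=
      PySem.List.pyRange_one_cons (by push_cast; omega)
    have hrange2 : PySem.List.pyRange (t+1) (t + ((k+1:Nat) : Int)) 1
        = PySem.List.pyRange (t+1) ((t+1) + ((k:Nat) : Int)) 1 := by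
      congr 1; push_cast; ring
    have hstep : bChain (PySem.List.pyRange t (t + ((k+1:Nat) : Int)) 1) count
        = (if (count.insert t (count.getD t 0 - 1)).getD t 0 < 0 then none
           else bChain (PySem.List.pyRange (t+1) ((t+1) + ((k:Nat) : Int)) 1)
                  (count.insert t (count.getD t 0 - 1))) := by
      rw [hrange, hrange2]; rfl
    have hins : (count.insert t (count.getD t 0 - 1)).getD t 0 = r.count t - 1 := by
      rw [PySem.Dict.getD_insert_self, hrel]
    by_cases hcnt : r.count t = 0
    · -- the sought value is absent: both fail
      have hneg : (count.insert t (count.getD t 0 - 1)).getD t 0 < 0 := by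
        rw [hins, hcnt]; omega
      have hrm : rmv r t = none := (rmv_eq_none_iff r t).2 (by
        intro hmem
        have := List.count_pos_iff.2 hmem
        omega)
      constructor
      · intro _; rw [hstep, if_pos hneg]
      · intro r' hr; rw [run, hrm] at hr; simp at hr
    · have hpos : 0 < r.count t := Nat.pos_of_ne_zero hcnt
      obtain ⟨q, hq⟩ : ∃ q, rmv r t = some q := by
        cases hrm : rmv r t with
        | none => exact absurd ((rmv_eq_none_iff r t).1 hrm) (by
            simpa using List.count_pos_iff.1 hpos)
        | some q => exact ⟨q, rfl⟩
      have hnneg : ¬ (count.insert t (count.getD t 0 - 1)).getD t 0 < 0 := by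
        rw [hins]; omega
      have hrel' : ∀ x : Int, (count.insert t (count.getD t 0 - 1)).getD x 0 = q.count x := by
        intro x
        rw [PySem.Dict.getD_insert]
        by_cases hx : x = t
        · subst hx
          have := rmv_count_self hq
          rw [if_pos rfl, hrel]; push_cast; omega
        · rw [if_neg hx, hrel, rmv_count_ne hq hx]
      have hnd' : (count.insert t (count.getD t 0 - 1)).keys.Nodup :=
        PySem.Dict.nodup_keys_insert _ _ _ hnd
      obtain ⟨ihn, ihs⟩ := ih (t+1) (count.insert t (count.getD t 0 - 1)) q hnd' hrel'
      constructor
      · intro hr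
        rw [run, hq] at hr
        rw [hstep, if_neg hnneg]
        exact ihn hr
      · intro r' hr
        rw [run, hq] at hr
        obtain ⟨d, hd1, hd2, hd3⟩ := ihs r' hr
        exact ⟨d, by rw [hstep, if_neg hnneg]; exact hd1, hd2, hd3⟩

theorem resid_cons_true (w : Int) (y : List (Int × Bool)) :
    resid ((w, true) :: y) = resid y := by simp [resid]

theorem resid_cons_false (w : Int) (y : List (Int × Bool)) :
    resid ((w, false) :: y) = w :: resid y := by simp [resid]

theorem outerZ_skip (gs v : Int) (a : Nat) (X : List (Int × Bool)) :
    outerZ gs (List.replicate a (v, true) ++ X) = outerZ gs X := by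
  induction a with
  | zero => simp
  | succ a ih => rw [List.replicate_succ, List.cons_append, show outerZ gs ((v, true) ::
      (List.replicate a (v, true) ++ X)) = outerZ gs (List.replicate a (v, true) ++ X) from by
        simp [outerZ], ih]

theorem neg1_not_resid {z : List (Int × Bool)} (h2 : P2 z) : (-1 : Int) ∉ resid z := by
  intro hm
  exact h2 (List.mem_map.2 ⟨(-1, false), mem_resid.1 hm, rfl⟩)

theorem mem_fst_of_mem_out {z out : List (Int × Bool)} (hfst : out.map Prod.fst = z.map Prod.fst)
    {q : Int × Bool} (hq : q ∈ out) : ∃ p ∈ z, p.1 = q.1 := by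
  have : q.1 ∈ z.map Prod.fst := by
    rw [← hfst]; exact List.mem_map.2 ⟨q, hq, rfl⟩
  obtain ⟨p, hp, hpe⟩ := List.mem_map.1 this
  exact ⟨p, hp, hpe⟩

-- one chain of A from value v against one `run`; re-establishes every invariant
theorem chain_step {z2 : List (Int × Bool)} {v gs : Int}
    (hgs : 1 ≤ gs) (hvne : v ≠ -1)
    (h1 : P1 z2) (h2 : P2 z2) (h3 : P3 z2) (h4 : P4 z2)
    (hge : ∀ q ∈ z2, v ≤ q.1)
    (hmne : ∀ q ∈ z2, q.2 = true → q.1 ≠ v)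
    (hb : v ≤ -2 → -1 < v + gs → ∀ q ∈ z2, q.2 = true → q.1 ≤ -2) :
    ((run (resid z2) (v+1) (gs-1).toNat = none → (scanZ z2 (v+1) (gs-1).toNat).2 ≠ 0)
     ∧ (∀ r'', run (resid z2) (v+1) (gs-1).toNat = some r'' →
        (scanZ z2 (v+1) (gs-1).toNat).2 = 0
        ∧ resid (scanZ z2 (v+1) (gs-1).toNat).1 = r''
        ∧ P1 (scanZ z2 (v+1) (gs-1).toNat).1
        ∧ P2 (scanZ z2 (v+1) (gs-1).toNat).1
        ∧ P3 (scanZ z2 (v+1) (gs-1).toNat).1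
        ∧ P4 (scanZ z2 (v+1) (gs-1).toNat).1
        ∧ (scanZ z2 (v+1) (gs-1).toNat).1.map Prod.fst = z2.map Prod.fst)) := by
  have htn : (((gs-1).toNat : Nat) : Int) = gs - 1 := by omega
  have hm' : ∀ p ∈ z2, p.2 = true → v + 1 ≤ p.1 := by
    intro q hq hqt
    have := hge q hq
    have := hmne q hq hqt
    omega
  have hb' : v + 1 ≤ -1 → -1 < (v+1) + ((gs-1).toNat : Int) → ∀ p ∈ z2, p.2 = true → p.1 ≤ -2 := by
    intro ha hbnd
    exact hb (by omega) (by omega)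
  obtain ⟨c1, c2, c3, c4⟩ := scan_run z2 (v+1) (gs-1).toNat h1 h2 h3 hm' hb'
  refine ⟨c1, ?_⟩
  intro r'' hr
  obtain ⟨hk0, hresid⟩ := c2 r'' hr
  have hfst := fst_scanZ z2 (v+1) (gs-1).toNat
  have hP1 : P1 (scanZ z2 (v+1) (gs-1).toNat).1 := by unfold P1 at h1 ⊢; rw [hfst]; exact h1
  have hP2 : P2 (scanZ z2 (v+1) (gs-1).toNat).1 := by unfold P2 at h2 ⊢; rw [hfst]; exact h2
  have hP4 : P4 (scanZ z2 (v+1) (gs-1).toNat).1 := by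
    rintro ⟨p, hp, hp2, hple⟩ q hq hqt
    have hp1z : (p.1, false) ∈ z2 := by
      apply mem_resid.1
      apply (run_sublist hr).mem
      rw [← hresid]
      apply mem_resid.2
      have : p = (p.1, false) := by rw [← hp2]
      exact this ▸ hp
    rcases c4 q hq hqt with hin | ⟨hq1, hq2⟩
    · exact h4 ⟨(p.1, false), hp1z, rfl, hple⟩ (q.1, true) hin rfl
    · rcases (by omega : v ≤ -2 ∨ 0 ≤ v) with hvle | hv0
      · by_cases hd : -1 < v + gs
        · exfalso
          rw [run_none_neg1 (by omega) (by omega) (neg1_not_resid h2)] at hr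
          simp at hr
        · omega
      · have := hge (p.1, false) hp1z
        simp only at this
        omega
  exact ⟨hk0, hresid, hP1, hP2, c3, hP4, hfst⟩

-- a completed outer loop consumed groups of exactly gs cards
theorem outerZ_div : ∀ (N : Nat) (z : List (Int × Bool)) (gs : Int), z.length ≤ N → 1 ≤ gs →
    P1 z → P2 z → P3 z → P4 z →
    outerZ gs z = true → (gs : Int) ∣ ((resid z).length : Int) := by
  intro N
  induction N with
  | zero =>
    intro z gs hl _ _ _ _ _ _
    have : z = [] := List.eq_nil_of_length_eq_zero (by omega)
    subst this; simp [resid]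
  | succ N ih =>
    intro z gs hl hgs h1 h2 h3 h4 hz
    match z with
    | [] => simp [resid]
    | (v, true) :: z' =>
      rw [show outerZ gs ((v, true) :: z') = outerZ gs z' from by simp [outerZ]] at hz
      have := ih z' gs (by simp only [List.length_cons] at hl; omega) hgs
        (P1_tail h1) (P2_tail h2) (P3_tail h3)
        (fun ⟨p, hp, h5, h6⟩ q hq hqt => h4 ⟨p, by simp [hp], h5, h6⟩ q (by simp [hq]) hqt) hz
      rw [resid_cons_true]
      exact this
    | (v, false) :: z' =>
      rw [show outerZ gs ((v, false) :: z')
          = (if (scanZ z' (v+1) (gs-1).toNat).2 = 0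
             then outerZ gs (scanZ z' (v+1) (gs-1).toNat).1 else false) from by
        simp [outerZ]] at hz
      have hvne : v ≠ -1 := P2_head h2
      have hcs := chain_step hgs hvne (P1_tail h1) (P2_tail h2) (P3_tail h3)
        (fun ⟨p, hp, h5, h6⟩ q hq hqt => h4 ⟨p, by simp [hp], h5, h6⟩ q (by simp [hq]) hqt)
        (P1_head_le h1)
        (fun q hq hqt hc => absurd (P3_head h3 hq hc.symm hqt) (by simp))
        (fun hvle hd q hq hqt => h4 ⟨(v, false), by simp, rfl, hvle⟩ q (by simp [hq]) hqt)
      by_cases hk : (scanZ z' (v+1) (gs-1).toNat).2 = 0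
      · rw [if_pos hk] at hz
        obtain ⟨r'', hr⟩ : ∃ r'', run (resid z') (v+1) (gs-1).toNat = some r'' := by
          cases hrr : run (resid z') (v+1) (gs-1).toNat with
          | none => exact absurd hk (hcs.1 hrr)
          | some q => exact ⟨q, rfl⟩
        obtain ⟨_, hresid, hQ1, hQ2, hQ3, hQ4, _⟩ := hcs.2 r'' hr
        have hd := ih (scanZ z' (v+1) (gs-1).toNat).1 gs
          (by rw [length_scanZ]; simp only [List.length_cons] at hl; omega) hgs hQ1 hQ2 hQ3 hQ4 hz
        obtain ⟨c, hc⟩ := hd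
        refine ⟨c + 1, ?_⟩
        have hlen := run_length hr
        have htn : (((gs-1).toNat : Nat) : Int) = gs - 1 := by omega
        rw [resid_cons_false]
        rw [hresid] at hc
        simp only [List.length_cons]
        have hmul : gs * (c + 1) = gs * c + gs := by ring
        push_cast
        push_cast at hc
        omega
      · rw [if_neg hk] at hz; simp at hz

def bEnd (cards : List Int) (count : PySem.Dict Int Int) (gs : Int) : Bool :=
  match bOuter cards count gs with
  | none => false
  | some d => d.values.all (fun c => c == 0)

theorem bEnd_nil (count : PySem.Dict Int Int) (gs : Int) :
    bEnd [] count gs = count.values.all (fun c => c == 0) := rfl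

theorem bEnd_cons_zero {count : PySem.Dict Int Int} {v : Int} (h : ¬ 0 < count.getD v 0)
    (cards : List Int) (gs : Int) :
    bEnd (v :: cards) count gs = bEnd cards count gs := by
  simp [bEnd, bOuter, h]

theorem bEnd_cons_none {count : PySem.Dict Int Int} {v gs : Int} (h : 0 < count.getD v 0)
    (hc : bChain (PySem.List.pyRange v (v + gs) 1) count = none) (cards : List Int) :
    bEnd (v :: cards) count gs = false := by
  simp [bEnd, bOuter, h, hc]

theorem bEnd_cons_some {count d : PySem.Dict Int Int} {v gs : Int} (h : 0 < count.getD v 0)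
    (hc : bChain (PySem.List.pyRange v (v + gs) 1) count = some d) (cards : List Int) :
    bEnd (v :: cards) count gs = bEnd cards d gs := by
  simp [bEnd, bOuter, h, hc]

theorem values_all_zero {d : PySem.Dict Int Int} (hnd : d.keys.Nodup)
    (h : ∀ x : Int, d.getD x 0 = 0) : d.values.all (fun c => c == 0) = true := by
  rw [PySem.Dict.values_eq_map_keys d hnd 0]
  simp only [List.all_map, List.all_eq_true]
  intro k _
  simp [h k]

theorem resid_append (A B : List (Int × Bool)) : resid (A ++ B) = resid A ++ resid B := by
  simp [resid]

theorem resid_replicate_true (a : Nat) (v : Int) :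
    resid (List.replicate a (v, true)) = [] := by
  induction a with
  | zero => simp [resid]
  | succ a ih => rw [List.replicate_succ, resid_cons_true, ih]

theorem resid_replicate_false (u : Nat) (v : Int) :
    resid (List.replicate u (v, false)) = List.replicate u v := by
  induction u with
  | zero => simp [resid]
  | succ u ih => rw [List.replicate_succ, resid_cons_false, ih, List.replicate_succ]

theorem block_decomp : ∀ (N : Nat) (v : Int) (mm : Bool) (z' : List (Int × Bool)),
    z'.length ≤ N → P1 ((v, mm) :: z') → P3 ((v, mm) :: z') →
    ∃ (a u : Nat) (z2 : List (Int × Bool)),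
      (v, mm) :: z' = List.replicate a (v, true) ++ List.replicate u (v, false) ++ z2
      ∧ (∀ q ∈ z2, v < q.1) ∧ 1 ≤ a + u := by
  intro N
  induction N with
  | zero =>
    intro v mm z' hl _ _
    obtain rfl : z' = [] := List.eq_nil_of_length_eq_zero (by omega)
    cases mm with
    | true => exact ⟨1, 0, [], by simp, by simp, by omega⟩
    | false => exact ⟨0, 1, [], by simp, by simp, by omega⟩
  | succ N ih =>
    intro v mm z' hl h1 h3
    match z' with
    | [] =>
      cases mm with
      | true => exact ⟨1, 0, [], by simp, by simp, by omega⟩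
      | false => exact ⟨0, 1, [], by simp, by simp, by omega⟩
    | (w, m2) :: z'' =>
      by_cases hw : w = v
      · subst hw
        obtain ⟨a, u, z2, heq, hgt, hau⟩ := ih w m2 z''
          (by simp only [List.length_cons] at hl; omega) (P1_tail h1) (P3_tail h3)
        cases mm with
        | true =>
          refine ⟨a + 1, u, z2, ?_, hgt, by omega⟩
          rw [List.replicate_succ, List.cons_append, List.cons_append, ← heq]
        | false =>
          -- an already consumed copy of w cannot follow an unconsumed one (P3)
          cases a with
          | succ a' =>
            exfalso
            have hmem : (w, true) ∈ (w, m2) :: z'' := by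
              rw [heq]
              exact List.mem_append.2 (Or.inl (by simp [List.replicate_succ]))
            exact absurd (P3_head h3 hmem rfl rfl) (by simp)
          | zero =>
            refine ⟨0, u + 1, z2, ?_, hgt, by omega⟩
            simp only [List.replicate_zero, List.nil_append] at heq
            simp only [List.replicate_zero, List.nil_append, List.replicate_succ,
              List.cons_append]
            rw [heq]
      · have hvw : v < w := by
          have := P1_head_le h1 (w, m2) (by simp)
          simp only at this
          omega
        refine ⟨(if mm then 1 else 0), (if mm then 0 else 1), (w, m2) :: z'', ?_, ?_, ?_⟩
        · cases mm
          · simp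
          · simp
        · intro q hq
          rcases List.mem_cons.1 hq with rfl | hq'
          · exact hvw
          · have := P1_head_le (P1_tail h1) q hq'
            omega
        · cases mm <;> simp

theorem BLK : ∀ (m : Nat) (u : Nat) (z2 : List (Int × Bool)) (count : PySem.Dict Int Int)
    (v gs : Int) (L : Nat),
    u ≤ m → 1 ≤ gs → v ≠ -1 → z2.length ≤ L →
    P1 z2 → P2 z2 → P3 z2 → P4 z2 →
    (∀ q ∈ z2, v < q.1) →
    (1 ≤ u → v ≤ -2 → -1 < v + gs → ∀ q ∈ z2, q.2 = true → q.1 ≤ -2) →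
    count.keys.Nodup →
    count.getD v 0 = (u : Int) →
    (∀ x : Int, x ≠ v → count.getD x 0 = (resid z2).count x) →
    (∀ (z2' : List (Int × Bool)) (count' : PySem.Dict Int Int),
        z2'.length ≤ L → z2'.map Prod.fst = z2.map Prod.fst →
        P1 z2' → P2 z2' → P3 z2' → P4 z2' → count'.keys.Nodup →
        (∀ x : Int, count'.getD x 0 = (resid z2').count x) →
        outerZ gs z2' = bEnd (z2'.map Prod.fst) count' gs) →
    outerZ gs (List.replicate u (v, false) ++ z2)
      = bEnd (List.replicate m v ++ z2.map Prod.fst) count gs := by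
  intro m
  induction m with
  | zero =>
    intro u z2 count v gs L hu hgs hvne hL h1 h2 h3 h4 hlt hdang hnd hcv hrel hcont
    obtain rfl : u = 0 := by omega
    have hvz : (resid z2).count v = 0 := by
      rw [List.count_eq_zero]
      intro hm
      have := hlt (v, false) (mem_resid.1 hm)
      omega
    simp only [List.replicate, List.nil_append]
    exact hcont z2 count hL rfl h1 h2 h3 h4 hnd (fun x => by
      by_cases hx : x = v
      · subst hx; rw [hcv, hvz]
      · exact hrel x hx)
  | succ m ihm =>
    intro u z2 count v gs L hu hgs hvne hL h1 h2 h3 h4 hlt hdang hnd hcv hrel hcont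
    rw [List.replicate_succ (n := m), List.cons_append]
    cases u with
    | zero =>
      rw [bEnd_cons_zero (by rw [hcv]; simp)]
      exact ihm 0 z2 count v gs L (by omega) hgs hvne hL h1 h2 h3 h4 hlt
        (fun h => absurd h (by omega)) hnd hcv hrel hcont
    | succ j =>
      have hpos : 0 < count.getD v 0 := by rw [hcv]; push_cast; omega
      have hvz2 : (resid z2).count v = 0 := by
        rw [List.count_eq_zero]
        intro hm
        have := hlt (v, false) (mem_resid.1 hm)
        omega
      rw [List.replicate_succ (n := j), List.cons_append]
      rw [show outerZ gs ((v, false) :: (List.replicate j (v, false) ++ z2))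
          = (if (scanZ (List.replicate j (v, false) ++ z2) (v+1) (gs-1).toNat).2 = 0
             then outerZ gs (scanZ (List.replicate j (v, false) ++ z2) (v+1) (gs-1).toNat).1
             else false) from by simp [outerZ]]
      rw [scanZ_append_lt (fun p hp => by
          obtain rfl := List.eq_of_mem_replicate hp
          simp)]
      have hcs := chain_step hgs hvne h1 h2 h3 h4 (fun q hq => le_of_lt (hlt q hq))
        (fun q hq _ => ne_of_gt (hlt q hq))
        (hdang (by omega))
      have hwin : PySem.List.pyRange v (v + gs) 1
          = v :: PySem.List.pyRange (v+1) ((v+1) + (((gs-1).toNat : Nat) : Int)) 1 := by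
        rw [PySem.List.pyRange_one_cons (by omega)]
        congr 2
        omega
      have hc1 : (count.insert v (count.getD v 0 - 1)).getD v 0 = (j : Int) := by
        rw [PySem.Dict.getD_insert_self, hcv]; push_cast; ring
      have hbch : bChain (PySem.List.pyRange v (v + gs) 1) count
          = bChain (PySem.List.pyRange (v+1) ((v+1) + (((gs-1).toNat : Nat) : Int)) 1)
              (count.insert v (count.getD v 0 - 1)) := by
        rw [hwin]
        show (if (count.insert v (count.getD v 0 - 1)).getD v 0 < 0 then none else _) = _
        rw [if_neg (by rw [hc1]; push_cast; omega)]
      have hnd1 : (count.insert v (count.getD v 0 - 1)).keys.Nodup :=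
        PySem.Dict.nodup_keys_insert _ _ _ hnd
      have hrel1 : ∀ x : Int, (count.insert v (count.getD v 0 - 1)).getD x 0
          = ((List.replicate j v ++ resid z2).count x : Int) := by
        intro x
        rw [PySem.Dict.getD_insert]
        by_cases hx : x = v
        · subst hx
          rw [if_pos rfl, hcv]
          simp [List.count_append, List.count_replicate, hvz2]
        · rw [if_neg hx, hrel x hx]
          simp [List.count_append, List.count_replicate, hx, Ne.symm hx]
      obtain ⟨ibn, ibs⟩ := bChain_run (gs-1).toNat (v+1) (count.insert v (count.getD v 0 - 1))
          (List.replicate j v ++ resid z2) hnd1 hrel1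
      have hrepl := run_replicate (by omega : v < v + 1) j (resid z2) (gs-1).toNat
      cases hrun : run (resid z2) (v+1) (gs-1).toNat with
      | none =>
        rw [if_neg (hcs.1 hrun)]
        rw [bEnd_cons_none hpos (by rw [hbch]; exact ibn (by rw [hrepl, hrun]; rfl))]
      | some r'' =>
        obtain ⟨hk0, hres, hQ1, hQ2, hQ3, hQ4, hfst⟩ := hcs.2 r'' hrun
        rw [if_pos hk0]
        obtain ⟨d, hd1, hd2, hd3⟩ := ibs (List.replicate j v ++ r'')
          (by rw [hrepl, hrun]; rfl)
        rw [bEnd_cons_some hpos (by rw [hbch]; exact hd1)]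
        have hrsub : r''.Sublist (resid z2) := run_sublist hrun
        have hvr : r''.count v = 0 := by
          rw [List.count_eq_zero]
          intro hm
          have := hlt (v, false) (mem_resid.1 (hrsub.mem hm))
          omega
        have hlt' : ∀ q ∈ (scanZ z2 (v+1) (gs-1).toNat).1, v < q.1 := by
          intro q hq
          obtain ⟨p, hp, hpe⟩ := mem_fst_of_mem_out hfst hq
          rw [← hpe]; exact hlt p hp
        have hcv' : d.getD v 0 = (j : Int) := by
          rw [hd3 v]
          simp [List.count_append, List.count_replicate, hvr]
          
        have hrel' : ∀ x : Int, x ≠ v →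
            d.getD x 0 = ((resid (scanZ z2 (v+1) (gs-1).toNat).1).count x : Int) := by
          intro x hx
          rw [hd3 x, hres]
          simp [List.count_append, List.count_replicate, hx, Ne.symm hx]
        have hdang' : 1 ≤ j → v ≤ -2 → -1 < v + gs →
            ∀ q ∈ (scanZ z2 (v+1) (gs-1).toNat).1, q.2 = true → q.1 ≤ -2 := by
          intro _ hvle hdng
          exfalso
          rw [run_none_neg1 (by omega) (by omega) (neg1_not_resid h2)] at hrun
          simp at hrun
        have hconT : ∀ (z2' : List (Int × Bool)) (count' : PySem.Dict Int Int),
            z2'.length ≤ L → z2'.map Prod.fst = (scanZ z2 (v+1) (gs-1).toNat).1.map Prod.fst →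
            P1 z2' → P2 z2' → P3 z2' → P4 z2' → count'.keys.Nodup →
            (∀ x : Int, count'.getD x 0 = (resid z2').count x) →
            outerZ gs z2' = bEnd (z2'.map Prod.fst) count' gs := by
          intro z2' count' ha hbf c1 c2 c3 c4 c5 c6
          exact hcont z2' count' ha (hbf.trans hfst) c1 c2 c3 c4 c5 c6
        have := ihm j (scanZ z2 (v+1) (gs-1).toNat).1 d v gs L (by omega) hgs hvne
          (by rw [length_scanZ]; exact hL) hQ1 hQ2 hQ3 hQ4 hlt' hdang' hd2 hcv' hrel' hconT
        rw [hfst] at this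
        exact this

theorem ML : ∀ (N : Nat) (z : List (Int × Bool)) (count : PySem.Dict Int Int) (gs : Int),
    z.length ≤ N → 1 ≤ gs → P1 z → P2 z → P3 z → P4 z → count.keys.Nodup →
    (∀ x : Int, count.getD x 0 = ((resid z).count x : Int)) →
    outerZ gs z = bEnd (z.map Prod.fst) count gs := by
  intro N
  induction N with
  | zero =>
    intro z count gs hl _ _ _ _ _ hnd hrel
    obtain rfl : z = [] := List.eq_nil_of_length_eq_zero (by omega)
    rw [show outerZ gs [] = true from by simp [outerZ], List.map_nil, bEnd_nil]
    exact (values_all_zero hnd (fun x => by rw [hrel x]; simp [resid])).symm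
  | succ N ihN =>
    intro z count gs hl hgs h1 h2 h3 h4 hnd hrel
    rcases z with _ | ⟨⟨v, mm⟩, z'⟩
    · rw [show outerZ gs [] = true from by simp [outerZ], List.map_nil, bEnd_nil]
      exact (values_all_zero hnd (fun x => by rw [hrel x]; simp [resid])).symm
    · obtain ⟨a, u, z2, heq, hgt, hau⟩ := block_decomp (N+1) v mm z'
        (by simp only [List.length_cons] at hl; omega) h1 h3
      rw [heq] at hl h1 h2 h3 h4 hrel ⊢
      have hlen2 : z2.length ≤ N := by
        simp only [List.length_append, List.length_replicate] at hl
        omega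
      have hsub : z2.Sublist (List.replicate a (v, true) ++ List.replicate u (v, false) ++ z2) :=
        List.sublist_append_right _ _
      have hmem2 : ∀ q ∈ z2, q ∈ List.replicate a (v, true) ++ List.replicate u (v, false) ++ z2 :=
        fun q hq => hsub.mem hq
      have h1' : P1 z2 := by
        unfold P1 at h1 ⊢
        exact h1.sublist (hsub.map Prod.fst)
      have h2' : P2 z2 := fun hc => h2 ((hsub.map Prod.fst).mem hc)
      have h3' : P3 z2 := h3.sublist hsub
      have h4' : P4 z2 := fun ⟨p, hp, ha, hb⟩ q hq hqt =>
        h4 ⟨p, hmem2 p hp, ha, hb⟩ q (hmem2 q hq) hqt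
      have hvne : v ≠ -1 := by
        intro hc
        apply h2
        subst hc
        rcases Nat.lt_or_ge 0 a with hA | hA
        · exact List.mem_map.2 ⟨(-1, true), List.mem_append.2 (Or.inl (List.mem_append.2
            (Or.inl (List.mem_replicate.2 ⟨by omega, rfl⟩)))), rfl⟩
        · exact List.mem_map.2 ⟨(-1, false), List.mem_append.2 (Or.inl (List.mem_append.2
            (Or.inr (List.mem_replicate.2 ⟨by omega, rfl⟩)))), rfl⟩
      have hresz : resid (List.replicate a (v, true) ++ List.replicate u (v, false) ++ z2)
          = List.replicate u v ++ resid z2 := by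
        rw [resid_append, resid_append, resid_replicate_true, resid_replicate_false]
        simp
      have hcv : count.getD v 0 = (u : Int) := by
        rw [hrel v, hresz]
        have : (resid z2).count v = 0 := by
          rw [List.count_eq_zero]
          intro hm
          have := hgt (v, false) (mem_resid.1 hm)
          omega
        simp [List.count_append, List.count_replicate, this]
      have hrel' : ∀ x : Int, x ≠ v → count.getD x 0 = ((resid z2).count x : Int) := by
        intro x hx
        rw [hrel x, hresz]
        simp [List.count_append, List.count_replicate, hx, Ne.symm hx]
      have hdang : 1 ≤ u → v ≤ -2 → -1 < v + gs → ∀ q ∈ z2, q.2 = true → q.1 ≤ -2 := by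
        intro hu hvle _ q hq hqt
        refine h4 ⟨(v, false), ?_, rfl, hvle⟩ q (hmem2 q hq) hqt
        exact List.mem_append.2 (Or.inl (List.mem_append.2
          (Or.inr (List.mem_replicate.2 ⟨by omega, rfl⟩))))
      have hcont : ∀ (z2' : List (Int × Bool)) (count' : PySem.Dict Int Int),
          z2'.length ≤ z2.length → z2'.map Prod.fst = z2.map Prod.fst →
          P1 z2' → P2 z2' → P3 z2' → P4 z2' → count'.keys.Nodup →
          (∀ x : Int, count'.getD x 0 = (resid z2').count x) →
          outerZ gs z2' = bEnd (z2'.map Prod.fst) count' gs := by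
        intro z2' count' ha _ c1 c2 c3 c4 c5 c6
        exact ihN z2' count' gs (by omega) hgs c1 c2 c3 c4 c5 c6
      have hblk := BLK (a + u) u z2 count v gs z2.length (by omega) hgs hvne (le_refl _)
        h1' h2' h3' h4' hgt hdang hnd hcv hrel' hcont
      have hmap : ((List.replicate a (v, true) ++ List.replicate u (v, false) ++ z2).map Prod.fst)
          = List.replicate (a + u) v ++ z2.map Prod.fst := by
        rw [List.map_append, List.map_append, List.map_replicate, List.map_replicate,
          List.replicate_add]
      rw [hmap, List.append_assoc, outerZ_skip]
      exact hblk

theorem set_append_len (pre : List Int) (y x : Int) (ys : List Int) :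
    (pre ++ y :: ys).set pre.length x = pre ++ x :: ys := by
  induction pre with
  | nil => rfl
  | cons a pre ih => simpa using ih

theorem render_cons_true (v : Int) (z : List (Int × Bool)) :
    render ((v, true) :: z) = -1 :: render z := rfl

theorem render_cons_false (v : Int) (z : List (Int × Bool)) :
    render ((v, false) :: z) = v :: render z := rfl


-- the while loop of findSuccessors over a masked suffix is exactly scanZ
theorem fsWhile_scanZ : ∀ (z : List (Int × Bool)) (k : Nat) (t gs : Int) (pre : List Int)
    (j n c : Int), j = pre.length → n = pre.length + z.length → c = gs - k →
    fsWhile (pre ++ render z) j n gs t c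
      = (pre ++ render (scanZ z t k).1, gs - ((scanZ z t k).2 : Int)) := by
  intro z
  induction z with
  | nil =>
    intro k t gs pre j n c hj hn hc
    rw [fsWhile, dif_neg (by subst hj hn; rintro ⟨h1, -⟩; push_cast [List.length_nil] at h1; omega)]
    have h2 : (scanZ ([] : List (Int × Bool)) t k).2 = k := by cases k <;> simp [scanZ]
    have h1 : (scanZ ([] : List (Int × Bool)) t k).1 = [] := by cases k <;> simp [scanZ]
    rw [h1, h2, hc]
  | cons p z ih =>
    intro k t gs pre j n c hj hn hc
    obtain ⟨v, m⟩ := p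
    cases k with
    | zero =>
      rw [fsWhile, dif_neg (by subst hc; rintro ⟨-, h2⟩; push_cast at h2; omega)]
      simp [scanZ, hc]
    | succ k =>
      rw [fsWhile, dif_pos (by
        subst hj hn hc
        refine ⟨by push_cast [List.length_cons]; omega, by push_cast; omega⟩)]
      have hrc : ∀ w : List (Int × Bool),
          render ((v, m) :: w) = (if m then (-1:Int) else v) :: render w := by
        intro w; cases m <;> rfl
      rw [hrc, hj]
      rw [PySem.List.pyGet?_append_length pre (render z) (if m then (-1:Int) else v)]
      simp only [Option.getD_some]
      by_cases hm : (if m then (-1:Int) else v) = t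
      · rw [if_pos hm]
        rw [show PySem.List.pySetD (pre ++ (if m then (-1:Int) else v) :: render z)
            ((pre.length : Int)) (-1) = (pre ++ [(-1 : Int)]) ++ render z from by
          rw [PySem.List.pySetD_natCast, set_append_len, ← List.singleton_append,
            ← List.append_assoc]]
        rw [ih k (t+1) gs (pre ++ [(-1:Int)]) _ _ _ (by simp)
          (by subst hn; push_cast [List.length_append, List.length_cons, List.length_nil]; omega)
          (by rw [hc]; push_cast; ring)]
        have hsc : scanZ ((v, m) :: z) t (k+1)
            = ((v, true) :: (scanZ z (t+1) k).1, (scanZ z (t+1) k).2) := by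
          cases m <;> simp only [scanZ] <;> rw [if_pos (by simpa using hm)]
        rw [hsc]
        dsimp only
        rw [render_cons_true]
        simp
      · rw [if_neg hm]
        rw [show pre ++ (if m then (-1:Int) else v) :: render z
            = (pre ++ [if m then (-1:Int) else v]) ++ render z from by simp]
        rw [ih (k+1) t gs (pre ++ [if m then (-1:Int) else v]) _ _ _ (by simp)
          (by subst hn; push_cast [List.length_append, List.length_cons, List.length_nil]; omega) (by rw [hc])]
        have hsc : scanZ ((v, m) :: z) t (k+1)
            = ((v, m) :: (scanZ z t (k+1)).1, (scanZ z t (k+1)).2) := by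
          cases m <;> simp only [scanZ] <;> rw [if_neg (by simpa using hm)]
        rw [hsc]
        dsimp only
        rw [hrc]
        simp

-- the outer loop of A over the masked suffix is exactly outerZ
theorem shLoop_outerZ : ∀ (N : Nat) (z : List (Int × Bool)) (pre : List Int) (gs i n : Int),
    z.length ≤ N → 1 ≤ gs → P2 z → i = pre.length → n = pre.length + z.length →
    shLoop (pre ++ render z) i n gs = outerZ gs z := by
  intro N
  induction N with
  | zero =>
    intro z pre gs i n hl _ _ hi hn
    obtain rfl : z = [] := List.eq_nil_of_length_eq_zero (by omega)
    rw [shLoop, dif_neg (by subst hi hn; simp)]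
    simp [outerZ]
  | succ N ih =>
    intro z pre gs i n hl hgs h2 hi hn
    rcases z with _ | ⟨⟨v, m⟩, z'⟩
    · rw [shLoop, dif_neg (by subst hi hn; simp)]
      simp [outerZ]
    · rw [shLoop, dif_pos (by subst hi hn; push_cast [List.length_cons]; omega)]
      cases m with
      | true =>
        rw [render_cons_true, hi]
        rw [PySem.List.pyGet?_append_length pre (render z') (-1 : Int)]
        simp only [Option.getD_some, if_pos rfl]
        rw [show pre ++ (-1 : Int) :: render z' = (pre ++ [(-1:Int)]) ++ render z' from by simp]
        rw [ih z' (pre ++ [(-1:Int)]) gs ((pre.length : Int)+1) n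
          (by simp only [List.length_cons] at hl; omega) hgs (P2_tail h2)
          (by push_cast [List.length_append]; simp)
          (by subst hn; push_cast [List.length_append, List.length_cons, List.length_nil]; omega)]
        simp [outerZ]
      | false =>
        have hvne : v ≠ -1 := by simpa using P2_head h2
        rw [render_cons_false, hi]
        rw [PySem.List.pyGet?_append_length pre (render z') v]
        simp only [Option.getD_some]
        rw [if_neg hvne]
        have hFS : findSuccessors (pre ++ v :: render z') ((pre.length : Int)) n gs
            = ((if gs - (((scanZ z' (v+1) (gs-1).toNat).2 : Nat) : Int) ≠ gs then false else true),
               (pre ++ [(-1:Int)]) ++ render (scanZ z' (v+1) (gs-1).toNat).1) := by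
          simp only [findSuccessors]
          rw [PySem.List.pyGet?_append_length pre (render z') v]
          simp only [Option.getD_some]
          rw [show PySem.List.pySetD (pre ++ v :: render z') ((pre.length : Int)) (-1)
              = (pre ++ [(-1:Int)]) ++ render z' from by
            rw [PySem.List.pySetD_natCast, set_append_len, ← List.singleton_append,
              ← List.append_assoc]]
          rw [fsWhile_scanZ z' ((gs-1).toNat) (v+1) gs (pre ++ [(-1:Int)]) _ _ _
            (by push_cast [List.length_append]; simp)
            (by subst hn; push_cast [List.length_append, List.length_cons, List.length_nil]; omega)
            (by push_cast; omega)]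
          dsimp only
          by_cases hq : gs - (((scanZ z' (v+1) (gs-1).toNat).2 : Nat) : Int) ≠ gs
          · rw [if_pos hq, if_pos hq]
          · rw [if_neg hq, if_neg hq]
        simp only [hFS]
        rw [show outerZ gs ((v, false) :: z')
            = (if (scanZ z' (v+1) (gs-1).toNat).2 = 0
               then outerZ gs (scanZ z' (v+1) (gs-1).toNat).1 else false) from by
          simp [outerZ]]
        by_cases hk : (scanZ z' (v+1) (gs-1).toNat).2 = 0
        · have hbool : (if gs - (((scanZ z' (v+1) (gs-1).toNat).2 : Nat) : Int) ≠ gs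
              then false else true) = true := by
            rw [if_neg (by rw [hk]; push_cast; omega)]
          rw [hbool, if_pos hk, if_neg (by simp : ¬ (true = false))]
          exact ih (scanZ z' (v+1) (gs-1).toNat).1 (pre ++ [(-1:Int)]) gs ((pre.length : Int)+1) n
            (by rw [length_scanZ]; simp only [List.length_cons] at hl; omega) hgs
            (by unfold P2; rw [fst_scanZ]; exact P2_tail h2)
            (by push_cast [List.length_append]; simp)
            (by subst hn
                push_cast [List.length_append, List.length_cons, List.length_nil, length_scanZ]
                omega)
        · have hbool : (if gs - (((scanZ z' (v+1) (gs-1).toNat).2 : Nat) : Int) ≠ gs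
              then false else true) = false := by
            rw [if_pos (by intro hc; exact hk (by omega))]
          rw [hbool, if_neg hk, if_pos rfl]

theorem P3_nomask (s : List Int) : P3 (s.map (fun x => (x, false))) := by
  induction s with
  | nil => exact List.Pairwise.nil
  | cons x s ih =>
    refine List.Pairwise.cons ?_ ih
    intro q hq _ h2
    obtain ⟨y, _, rfl⟩ := List.mem_map.1 hq
    simpa using h2

theorem P4_nomask (s : List Int) : P4 (s.map (fun x => (x, false))) := by
  rintro _ q hq hqt
  obtain ⟨y, _, rfl⟩ := List.mem_map.1 hq
  simpa using hqt

theorem render_nomask (s : List Int) : render (s.map (fun x => (x, false))) = s := by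
  induction s with
  | nil => rfl
  | cons x s ih => simpa [render] using ih

theorem fst_nomask (s : List Int) : (s.map (fun x => (x, false))).map Prod.fst = s := by
  induction s with
  | nil => rfl
  | cons x s ih => simpa using ih

theorem resid_nomask (s : List Int) : resid (s.map (fun x => (x, false))) = s := by
  induction s with
  | nil => rfl
  | cons x s ih => simpa [resid] using ih

theorem bOuter_nonpos (gs : Int) (hgs : gs ≤ 0) : ∀ (cards : List Int)
    (count : PySem.Dict Int Int), (∀ w ∈ cards, 0 < count.getD w 0) →
    bOuter cards count gs = some count := by
  intro cards
  induction cards with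
  | nil => intro count _; rfl
  | cons v cards ih =>
    intro count h
    simp only [bOuter]
    rw [if_pos (h v (by simp))]
    rw [PySem.List.pyRange_one_eq_nil (by omega)]
    exact ih count (fun w hw => h w (by simp [hw]))

theorem A_unfold_mod1 (hand : List Int) (gs : Int)
    (h : PySem.Int.mod (hand.length : Int) gs = 1) : straightHand hand gs = false := by
  simp [straightHand, h]

theorem A_unfold (hand : List Int) (gs : Int)
    (h : ¬ PySem.Int.mod (hand.length : Int) gs = 1) :
    straightHand hand gs
      = shLoop (PySem.List.sorted hand (fun x => x) false) 0 (hand.length) gs := by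
  simp [straightHand, h]

theorem B_unfold (hand : List Int) (gs : Int) :
    straightHand_alt hand gs
      = bEnd (PySem.List.sorted hand (fun x => x) false) (PySem.Dict.counter hand) gs := by
  simp only [straightHand_alt, PySem.Dict.foldl_insert_getD_add_one_eq_counter]
  rfl

-- ===== VERDICT (by name: the statement is the Claim_ definition above) =====
theorem straightHand_spec : Claim_equal_straightHand := by
  intro hand gs _hdom hpre
  obtain ⟨hgs0, hm1⟩ := hpre
  unfold Spec_straightHand
  have hperm : (PySem.List.sorted hand (fun x => x) false).Perm hand :=
    PySem.List.sorted_perm hand (fun x => x) false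
  set s := PySem.List.sorted hand (fun x => x) false with hsdef
  have hslen : s.length = hand.length := hperm.length_eq
  have hm1s : (-1 : Int) ∉ s := fun hc => hm1 (hperm.mem_iff.1 hc)
  set z0 : List (Int × Bool) := s.map (fun x => (x, false)) with hz0
  have hrend : render z0 = s := by rw [hz0]; exact render_nomask s
  have hfst0 : z0.map Prod.fst = s := by rw [hz0]; exact fst_nomask s
  have hres0 : resid z0 = s := by rw [hz0]; exact resid_nomask s
  have hlen0 : z0.length = s.length := by rw [hz0]; simp
  have hP1 : P1 z0 := by
    unfold P1; rw [hfst0]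
    simpa using PySem.List.sorted_pairwise hand (fun x => x)
  have hP2 : P2 z0 := by unfold P2; rw [hfst0]; exact hm1s
  have hP3 : P3 z0 := by rw [hz0]; exact P3_nomask s
  have hP4 : P4 z0 := by rw [hz0]; exact P4_nomask s
  have hnd0 : (PySem.Dict.counter hand).keys.Nodup := PySem.Dict.nodup_keys_counter hand
  have hrel0 : ∀ x : Int, (PySem.Dict.counter hand).getD x 0 = ((resid z0).count x : Int) := by
    intro x
    rw [PySem.Dict.getD_counter, hres0]
    exact_mod_cast congrArg Nat.cast (hperm.count_eq x).symm
  rcases lt_or_gt_of_ne hgs0 with hneg | hpos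
  · -- groupSize ≤ -1 : A fails its first group, B leaves every count positive
    have hmodn : ¬ PySem.Int.mod (hand.length : Int) gs = 1 := by
      have h := PySem.Int.mod_neg_bounds (hand.length : Int) hneg
      omega
    rw [A_unfold hand gs hmodn, B_unfold hand gs, ← hsdef]
    rcases hs : s with _ | ⟨y, s'⟩
    · have hhe : hand = [] := by
        apply List.eq_nil_of_length_eq_zero
        rw [← hslen, hs]
        rfl
      rw [shLoop, dif_neg (by rw [← hslen, hs]; simp), bEnd_nil, hhe]
      rfl
    · have hys : y ∈ s := by rw [hs]; simp
      have hyne : y ≠ -1 := fun hc => hm1s (hc ▸ hys)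
      have hn1 : (1:Int) ≤ (hand.length : Int) := by
        rw [← hslen, hs]
        push_cast [List.length_cons]
        omega
      -- A side
      rw [shLoop, dif_pos (by omega)]
      rw [PySem.List.pyGet?_zero_cons]
      simp only [Option.getD_some]
      rw [if_neg hyne]
      have hFS : findSuccessors (y :: s') 0 (hand.length : Int) gs = (false, (-1 : Int) :: s') := by
        simp only [findSuccessors]
        rw [PySem.List.pyGet?_zero_cons]
        simp only [Option.getD_some]
        rw [show PySem.List.pySetD (y :: s') 0 (-1) = (-1 : Int) :: s' from by
          rw [PySem.List.pySetD_of_nonneg (xs := y :: s') (i := 0) (v := (-1:Int)) (by omega)]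
          rfl]
        rw [fsWhile, dif_neg (by rintro ⟨-, h2⟩; omega)]
        dsimp only
        rw [if_pos (by omega)]
      simp only [hFS]
      rw [if_pos trivial]
      -- B side
      rw [show bEnd (y :: s') (PySem.Dict.counter hand) gs
          = (PySem.Dict.counter hand).values.all (fun c => c == 0) from by
        simp only [bEnd]
        rw [bOuter_nonpos gs (by omega) (y :: s') (PySem.Dict.counter hand) (fun w hw => by
          rw [PySem.Dict.getD_counter]
          have hwh : w ∈ hand := hperm.mem_iff.1 (by rw [hs]; exact hw)
          have := List.count_pos_iff.2 hwh
          push_cast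
          omega)]]
      cases hall : (PySem.Dict.counter hand).values.all (fun c => c == 0) with
      | false => rfl
      | true =>
        exfalso
        have hyh : y ∈ hand := hperm.mem_iff.1 hys
        have hymem : (PySem.Dict.counter hand).getD y 0 ∈ (PySem.Dict.counter hand).values := by
          rw [PySem.Dict.values_eq_map_keys _ hnd0 0]
          refine List.mem_map.2 ⟨y, ?_, rfl⟩
          rw [PySem.Dict.keys_counter]
          exact (PySem.Set.mem_ofList hand y).2 hyh
        have := List.all_eq_true.1 hall _ hymem
        rw [PySem.Dict.getD_counter] at this
        have hcp := List.count_pos_iff.2 hyh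
        simp only [beq_iff_eq] at this
        omega
  · -- 1 ≤ groupSize : the main correspondence
    have hgs1 : (1:Int) ≤ gs := hpos
    have hML := ML z0.length z0 (PySem.Dict.counter hand) gs le_rfl hgs1 hP1 hP2 hP3 hP4
      hnd0 hrel0
    rw [hfst0] at hML
    by_cases hmod : PySem.Int.mod (hand.length : Int) gs = 1
    · rw [A_unfold_mod1 hand gs hmod, B_unfold hand gs, ← hsdef, ← hML]
      cases houter : outerZ gs z0 with
      | false => rfl
      | true =>
        exfalso
        have hdvd := outerZ_div z0.length z0 gs le_rfl hgs1 hP1 hP2 hP3 hP4 houter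
        rw [hres0] at hdvd
        have hz := (PySem.Int.mod_eq_zero_iff_dvd (s.length : Int) gs).2 hdvd
        rw [hslen] at hz
        omega
    · rw [A_unfold hand gs hmod, B_unfold hand gs, ← hsdef, ← hML]
      have hbr := shLoop_outerZ z0.length z0 [] gs 0 (hand.length) le_rfl hgs1 hP2
        (by simp) (by push_cast [List.length_nil]; rw [hlen0, hslen]; push_cast; ring)
      rw [List.nil_append, hrend] at hbr
      exact hbr
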